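-- pv_equiv track=rewrite | github.com/gabzn/Graph | Postorder-dfs-iterative.py | postorder_dfs
-- ===== SOURCE A (Python) =====
-- def postorder_dfs(graph):
--     dfs_stack, ordering = [], []
--     visited_nodes = set()
--
--     for node in graph:
--         if node in visited_nodes:
--             continue
--
--         # Visit all nodes in preorder fashion first.
--         preorder = []
--         dfs_stack.append(node)
--         while dfs_stack:
--             cur_node = dfs_stack.pop()
--
--             if cur_node in visited_nodes:
--                 continue
--             visited_nodes.add(cur_node)
--
--             preorder.append(cur_node)
--
--             for neighbour in graph[cur_node]:
--                 dfs_stack.append(neighbour)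
--
--         # After visiting all the neighbours in preorder fashion, we start popping nodes from the end
--         # to simulate that we are visiting all the neighbours first.
--         while preorder:
--             ordering.append(preorder.pop())
--
--     return ordering
-- ===== SOURCE B (Python) =====
-- def postorder_dfs(graph):
--     visited = set()
--     ordering = []
--
--     def dfs(u, pre):
--         if u in visited:
--             return
--         visited.add(u)
--         pre.append(u)
--         for v in reversed(graph[u]):
--             dfs(v, pre)
--
--     for node in graph:
--         if node in visited:
--             continue
--         pre = []
--         dfs(node, pre)
--         ordering.extend(reversed(pre))
--
--     return ordering
-- ===== Notes on version B (the rewrite author's own statement) =====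
-- stated objective: alternative
-- what changed: Replaces A's explicit-stack loop (push node, pop LIFO, push all neighbours, then pop the per-component preorder list to reverse it) by a recursive DFS helper that marks/records each node and recurses into the reversed neighbour list, the outer loop extending the ordering with the reversed per-component preorder.
import Mathlib
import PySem

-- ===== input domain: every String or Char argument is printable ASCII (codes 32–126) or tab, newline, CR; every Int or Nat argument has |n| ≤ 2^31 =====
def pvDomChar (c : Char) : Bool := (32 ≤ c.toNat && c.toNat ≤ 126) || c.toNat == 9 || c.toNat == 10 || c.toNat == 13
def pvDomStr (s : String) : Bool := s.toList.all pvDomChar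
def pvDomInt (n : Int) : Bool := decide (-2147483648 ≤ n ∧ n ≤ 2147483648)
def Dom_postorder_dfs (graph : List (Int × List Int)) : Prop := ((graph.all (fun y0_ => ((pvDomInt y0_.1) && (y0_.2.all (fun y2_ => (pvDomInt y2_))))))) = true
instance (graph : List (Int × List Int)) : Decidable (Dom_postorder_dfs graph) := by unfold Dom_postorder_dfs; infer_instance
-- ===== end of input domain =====

-- B replaces A's explicit-stack DFS loop by a recursive DFS over reversed neighbour lists
-- (alternative decomposition, same cost).  Both ports evaluate Python's graph[u] as
-- (d.get? u).getD [] — exact except where Python raises KeyError, which Pre_ excludes.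

-- ===== PORT A =====

-- number of keys not yet visited (termination measure only, not part of A's data)
def pvUnvis (U : List Int) (vis : PySem.Set Int) : Nat :=
  (U.filter (fun x => !(vis.contains x))).length

theorem pv_contains_add_of (vis : PySem.Set Int) (x a : Int) (h : vis.contains a = true) :
    (PySem.Set.add vis x).contains a = true := by
  simp only [PySem.Set.contains, PySem.Set.add] at *
  split
  · exact h
  · simp_all

theorem pv_contains_add_self (vis : PySem.Set Int) (x : Int) :
    (PySem.Set.add vis x).contains x = true := by
  simp only [PySem.Set.contains, PySem.Set.add]
  split
  · simp_all
  · simp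

theorem pv_filter_add_sublist (U : List Int) (vis : PySem.Set Int) (x : Int) :
    (U.filter (fun a => !((PySem.Set.add vis x).contains a))).Sublist
      (U.filter (fun a => !(vis.contains a))) := by
  refine List.monotone_filter_right U ?_
  intro a ha
  simp only [Bool.not_eq_true'] at *
  cases h : vis.contains a with
  | false => rfl
  | true => rw [pv_contains_add_of vis x a h] at ha; cases ha

theorem pvUnvis_add_le (U : List Int) (vis : PySem.Set Int) (x : Int) :
    pvUnvis U (PySem.Set.add vis x) ≤ pvUnvis U vis :=
  (pv_filter_add_sublist U vis x).length_le

theorem pvUnvis_add_lt (U : List Int) (vis : PySem.Set Int) (x : Int)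
    (hxU : x ∈ U) (hx : vis.contains x = false) :
    pvUnvis U (PySem.Set.add vis x) < pvUnvis U vis := by
  have hsub := pv_filter_add_sublist U vis x
  rcases Nat.lt_or_ge (pvUnvis U (PySem.Set.add vis x)) (pvUnvis U vis) with h | h
  · exact h
  · exfalso
    have heq := hsub.eq_of_length (Nat.le_antisymm hsub.length_le h)
    have hmem : x ∈ U.filter (fun a => !(vis.contains a)) := by
      simp only [List.mem_filter, Bool.not_eq_true']
      exact ⟨hxU, hx⟩
    rw [← heq] at hmem
    have := (List.mem_filter.mp hmem).2
    rw [pv_contains_add_self vis x] at this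
    cases this

theorem pv_mem_keys_of_get? (d : PySem.Dict Int (List Int)) (c : Int) (adj : List Int)
    (h : d.get? c = some adj) : c ∈ d.keys := by
  simp only [PySem.Dict.get?, Option.map_eq_some_iff] at h
  obtain ⟨p, hp, rfl⟩ := h
  have hmem := List.mem_of_find?_eq_some hp
  have hbeq := List.find?_some hp
  simp only [PySem.Dict.keys, List.mem_map]
  exact ⟨p, hmem, by simpa using hbeq⟩

-- A's while-loop: the stack with its top at the head; pop cur, skip it if visited, else mark
-- it, append it to the preorder list and push graph[cur]'s neighbours (top = last neighbour)
def visitA (d : PySem.Dict Int (List Int)) :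
    List Int → PySem.Set Int → List Int → PySem.Set Int × List Int
  | [], vis, pre => (vis, pre)
  | c :: rest, vis, pre =>
    if vis.contains c then visitA d rest vis pre
    else visitA d (((d.get? c).getD []).reverse ++ rest) (PySem.Set.add vis c) (pre ++ [c])
  termination_by stack vis _ => (pvUnvis d.keys vis, stack.length)
  decreasing_by
  · exact Prod.Lex.right _ (Nat.lt_succ_self _)
  · rename_i hc
    rcases hadj : d.get? c with _ | adj
    · rcases Nat.lt_or_eq_of_le (pvUnvis_add_le d.keys vis c) with h | h
      · exact Prod.Lex.left _ _ h
      · rw [h]; exact Prod.Lex.right _ (by simp)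
    · exact Prod.Lex.left _ _ (pvUnvis_add_lt d.keys vis c
        (pv_mem_keys_of_get? d c adj hadj) (by simpa using hc))

def postorder_dfs (graph : List (Int × List Int)) : List Int :=
  let d := PySem.Dict.ofList graph
  (d.keys.foldl
    (fun st node =>
      if st.1.contains node then st
      else
        let r := visitA d [node] st.1 []
        (r.1, st.2 ++ r.2.reverse))
    (PySem.Set.empty, [])).2

-- ===== PORT B =====

-- Source B's recursive dfs: 'if u in visited: return; visited.add(u); pre.append(u);
-- for v in reversed(graph[u]): dfs(v, pre)'.  The Nat fuel is only a totality guard: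
-- the top-level call passes keys.length + 1, which the proofs show is never exhausted.
mutual
def dfsB (d : PySem.Dict Int (List Int)) :
    Nat → Int → PySem.Set Int → List Int → PySem.Set Int × List Int
  | 0, _, vis, pre => (vis, pre)
  | fuel + 1, u, vis, pre =>
    if vis.contains u then (vis, pre)
    else dfsListB d fuel (((d.get? u).getD []).reverse) (PySem.Set.add vis u) (pre ++ [u])
  termination_by fuel _ _ _ => (fuel, 0)

-- the 'for v in reversed(graph[u]): dfs(v, pre)' loop, threading (visited, pre)
def dfsListB (d : PySem.Dict Int (List Int)) :
    Nat → List Int → PySem.Set Int → List Int → PySem.Set Int × List Int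
  | _, [], vis, pre => (vis, pre)
  | fuel, v :: rest, vis, pre =>
    let r := dfsB d fuel v vis pre
    dfsListB d fuel rest r.1 r.2
  termination_by fuel l _ _ => (fuel, l.length + 1)
end

def postorder_dfs_alt (graph : List (Int × List Int)) : List Int :=
  let d := PySem.Dict.ofList graph
  let fuel := d.keys.length + 1
  (d.keys.foldl
    (fun st node =>
      if st.1.contains node then st
      else
        let r := dfsB d fuel node st.1 []
        (r.1, st.2 ++ r.2.reverse))
    (PySem.Set.empty, [])).2

-- ===== PRECONDITION & SPEC =====
-- Pre_ excludes graphs with a neighbour that is not a key: there Python's graph[cur_node]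
-- raises KeyError (in A and in B alike).
def Pre_postorder_dfs (graph : List (Int × List Int)) : Prop :=
  ∀ p ∈ graph, ∀ v ∈ p.2, v ∈ graph.map Prod.fst
instance (graph : List (Int × List Int)) : Decidable (Pre_postorder_dfs graph) := by
  unfold Pre_postorder_dfs; infer_instance
def pvWitness_postorder_dfs : (List (Int × List Int)) := [(0, [1]), (1, [0, 1]), (2, [])]

def Spec_postorder_dfs (graph : List (Int × List Int)) (out : List Int) : Prop := out = postorder_dfs_alt graph
instance (graph : List (Int × List Int)) (out : List Int) : Decidable (Spec_postorder_dfs graph out) := by unfold Spec_postorder_dfs; infer_instance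

-- ===== CLAIM (what is proved, stated in full; the proofs are below) =====
def Claim_equal_postorder_dfs : Prop := ∀ (graph : List (Int × List Int)), Dom_postorder_dfs graph → Pre_postorder_dfs graph → Spec_postorder_dfs graph (postorder_dfs graph)

-- ===== LEMMAS AND PROOFS =====

theorem pvUnvis_le (U : List Int) (vis : PySem.Set Int) : pvUnvis U vis ≤ U.length :=
  List.length_filter_le _ _

theorem visitA_mono (d : PySem.Dict Int (List Int)) (stack : List Int)
    (vis : PySem.Set Int) (pre : List Int) :
    pvUnvis d.keys (visitA d stack vis pre).1 ≤ pvUnvis d.keys vis := by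
  induction stack, vis, pre using visitA.induct d with
  | case1 vis pre => simp [visitA]
  | case2 c rest vis pre hc ih => rw [visitA, if_pos hc]; exact ih
  | case3 c rest vis pre hc ih =>
      rw [visitA, if_neg hc]
      exact le_trans ih (pvUnvis_add_le _ _ _)

theorem visitA_append (d : PySem.Dict Int (List Int)) (ys xs : List Int)
    (vis : PySem.Set Int) (pre : List Int) :
    visitA d (xs ++ ys) vis pre =
      visitA d ys (visitA d xs vis pre).1 (visitA d xs vis pre).2 := by
  induction xs, vis, pre using visitA.induct d with
  | case1 vis pre => simp [visitA]
  | case2 c rest vis pre hc ih =>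
      rw [List.cons_append, visitA, if_pos hc, ih, visitA, if_pos hc]
  | case3 c rest vis pre hc ih =>
      rw [List.cons_append, visitA, if_neg hc, ← List.append_assoc, ih]
      conv_rhs => rw [visitA, if_neg hc]

-- with enough fuel, B's neighbour loop computes exactly A's stack loop
theorem main_eq (d : PySem.Dict Int (List Int)) :
    ∀ (n : Nat) (stack : List Int) (vis : PySem.Set Int) (pre : List Int) (fuel : Nat),
      pvUnvis d.keys vis ≤ n → pvUnvis d.keys vis < fuel →
      dfsListB d fuel stack vis pre = visitA d stack vis pre := by
  intro n
  induction n using Nat.strong_induction_on with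
  | _ n IHn =>
  intro stack
  induction stack with
  | nil =>
      intro vis pre fuel _ _
      cases fuel <;> simp [dfsListB, visitA]
  | cons c rest IHs =>
      intro vis pre fuel h1 h2
      obtain ⟨f, rfl⟩ : ∃ f, fuel = f + 1 := ⟨fuel - 1, by omega⟩
      by_cases hc : vis.contains c = true
      · rw [dfsListB]
        show dfsListB d (f+1) rest (dfsB d (f+1) c vis pre).1 (dfsB d (f+1) c vis pre).2
          = visitA d (c :: rest) vis pre
        rw [dfsB, if_pos hc, visitA, if_pos hc]
        exact IHs vis pre (f+1) h1 h2
      · rcases hadj : d.get? c with _ | adj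
        · rw [dfsListB]
          show dfsListB d (f+1) rest (dfsB d (f+1) c vis pre).1 (dfsB d (f+1) c vis pre).2
            = visitA d (c :: rest) vis pre
          rw [dfsB, if_neg hc, hadj, visitA, if_neg hc, hadj]
          simp only [Option.getD_none, List.reverse_nil, List.nil_append, dfsListB]
          exact IHs (PySem.Set.add vis c) (pre ++ [c]) (f+1)
            (le_trans (pvUnvis_add_le _ _ _) h1) (lt_of_le_of_lt (pvUnvis_add_le _ _ _) h2)
        · have hmem : c ∈ d.keys := pv_mem_keys_of_get? d c adj hadj
          have hlt : pvUnvis d.keys (PySem.Set.add vis c) < pvUnvis d.keys vis :=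
            pvUnvis_add_lt _ _ _ hmem (by simpa using hc)
          rw [dfsListB]
          show dfsListB d (f+1) rest (dfsB d (f+1) c vis pre).1 (dfsB d (f+1) c vis pre).2
            = visitA d (c :: rest) vis pre
          rw [dfsB, if_neg hc, hadj]
          simp only [Option.getD_some]
          have e2 : dfsListB d f adj.reverse (PySem.Set.add vis c) (pre ++ [c])
              = visitA d adj.reverse (PySem.Set.add vis c) (pre ++ [c]) :=
            IHn (pvUnvis d.keys (PySem.Set.add vis c)) (lt_of_lt_of_le hlt h1)
              adj.reverse _ _ f le_rfl (by omega)
          rw [e2]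
          set t := visitA d adj.reverse (PySem.Set.add vis c) (pre ++ [c]) with ht
          have htle : pvUnvis d.keys t.1 ≤ pvUnvis d.keys (PySem.Set.add vis c) := by
            rw [ht]; exact visitA_mono d _ _ _
          have e3 : dfsListB d (f+1) rest t.1 t.2 = visitA d rest t.1 t.2 :=
            IHn (pvUnvis d.keys t.1) (by omega) rest t.1 t.2 (f+1) le_rfl (by omega)
          rw [e3, visitA, if_neg hc, hadj]
          simp only [Option.getD_some]
          rw [visitA_append d rest adj.reverse]

theorem dfsB_eq_visitA (d : PySem.Dict Int (List Int)) (node : Int)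
    (vis : PySem.Set Int) (hnode : node ∈ d.keys) (hc : ¬ vis.contains node = true) :
    dfsB d (d.keys.length + 1) node vis [] = visitA d [node] vis [] := by
  have hle := pvUnvis_le d.keys vis
  rw [dfsB, if_neg hc]
  rcases hadj : d.get? node with _ | adj
  · rw [visitA, if_neg hc, hadj]
    simp only [Option.getD_none, List.reverse_nil, List.nil_append, dfsListB, visitA]
  · have hlt : pvUnvis d.keys (PySem.Set.add vis node) < pvUnvis d.keys vis :=
      pvUnvis_add_lt _ _ _ hnode (by simpa using hc)
    simp only [Option.getD_some]
    rw [main_eq d (pvUnvis d.keys (PySem.Set.add vis node)) adj.reverse _ _ _ le_rfl (by omega)]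
    rw [visitA, if_neg hc, hadj]
    simp only [Option.getD_some, List.append_nil]

-- ===== VERDICT (by name: the statement is the Claim_ definition above) =====
theorem postorder_dfs_spec : Claim_equal_postorder_dfs := by
  intro graph _ _
  unfold Spec_postorder_dfs postorder_dfs postorder_dfs_alt
  refine congrArg Prod.snd ?_
  refine PySem.List.foldl_congr_mem _ _ _ _ ?_
  intro st node hnode
  by_cases hc : st.1.contains node = true
  · rw [if_pos hc, if_pos hc]
  · rw [if_neg hc, if_neg hc, dfsB_eq_visitA _ node st.1 hnode hc]
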